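-- pv_equiv track=rewrite | github.com/84436/AI-Lab-02 | src/PLRes.py | neg_alpha
-- ===== SOURCE A (Python) =====
-- from itertools import product, groupby
--
-- def neg(x):
--     if '-' in x:
--         return x.replace('-', '')
--     else:
--         return '-' + x
--
-- def neg_alpha(alpha):
--     r = []
--     for each in alpha:
--         r.append([neg(c) for c in each])
--     r = list(product(*r))
--     r2 = []
--     for i, each in enumerate(r):
--         if all(neg(each_c) not in each for each_c in each):
--             r2.append(each)
--     r = r2
--     r = [
--         sorted(set(each), key=lambda c: c.replace('-', '') if '-' in c else c)
--         for each in r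
--     ]
--     r = list(each for each, _ in groupby(sorted(r)))
--     return r
-- ===== SOURCE B (Python) =====
-- def neg(x):
--     if '-' in x:
--         return x.replace('-', '')
--     else:
--         return '-' + x
--
-- def neg_alpha(alpha):
--     combos = [[]]
--     for clause in alpha:
--         nxt = []
--         for combo in combos:
--             for c in clause:
--                 lit = neg(c)
--                 if all(d != neg(lit) and neg(d) != lit for d in combo):
--                     nxt.append(combo + [lit])
--         combos = nxt
--     canon = [
--         sorted(set(combo), key=lambda c: c.replace('-', '') if '-' in c else c)
--         for combo in combos
--     ]
--     out = []
--     for each in sorted(canon):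
--         if not out or out[-1] != each:
--             out.append(each)
--     return out
-- ===== Notes on version B (the rewrite author's own statement) =====
-- stated objective: alternative
-- what changed: B replaces A's materialize-the-full-itertools.product-then-filter-tautologies pipeline by a single clause-by-clause fold that extends partial combinations and prunes any extension creating a complementary literal pair as it goes, then canonicalizes and deduplicates with a running last-kept-element scan instead of groupby.
import Mathlib
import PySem

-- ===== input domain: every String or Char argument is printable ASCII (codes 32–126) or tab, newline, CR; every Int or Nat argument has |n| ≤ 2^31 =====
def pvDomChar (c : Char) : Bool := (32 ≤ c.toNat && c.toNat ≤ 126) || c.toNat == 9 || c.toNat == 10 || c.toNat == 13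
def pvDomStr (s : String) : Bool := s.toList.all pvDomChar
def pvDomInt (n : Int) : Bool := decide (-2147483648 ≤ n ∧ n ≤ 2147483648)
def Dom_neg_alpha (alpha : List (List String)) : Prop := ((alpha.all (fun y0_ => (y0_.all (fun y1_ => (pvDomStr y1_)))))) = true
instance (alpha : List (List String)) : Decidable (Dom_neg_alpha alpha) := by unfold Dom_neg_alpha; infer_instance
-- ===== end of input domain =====

-- B replaces A's full itertools.product + post-hoc tautology filter by one clause-by-clause fold that
-- prunes complementary extensions while building the combinations (objective: alternative decomposition).

-- ===== PORT A =====
-- shared helper `neg` (identical in Source A and Source B); '-' + x is ported as consing '-' onto the code points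
def pvNeg (x : String) : String :=
  if PySem.Str.isIn "-" x then PySem.Str.replace x "-" "" else String.ofList ('-' :: x.toList)

-- the sort key  lambda c: c.replace('-', '') if '-' in c else c  (identical in Source A and Source B)
def pvKey (c : String) : String :=
  if PySem.Str.isIn "-" c then PySem.Str.replace c "-" "" else c

-- list(each for each, _ in groupby(l)) : first element of every run of equal elements
def pvGroupbyKeys {α : Type} [DecidableEq α] : List α → List α
  | [] => []
  | x :: xs => x :: pvGroupbyKeys (xs.dropWhile (fun y => decide (y = x)))
termination_by l => l.length
decreasing_by
  simp
  exact List.length_dropWhile_le _ _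

def neg_alpha (alpha : List (List String)) : List (List String) :=
  -- r = [[neg(c) for c in each] for each in alpha]
  let r := alpha.map (fun each => each.map pvNeg)
  -- r = list(product(*r))  (hand port, exact: itertools.product order, last factor fastest)
  let r := r.foldl (fun acc cl => acc.flatMap (fun t => cl.map (fun c => t ++ [c]))) [[]]
  -- r2 = the tuples with  all(neg(each_c) not in each for each_c in each)
  let r := r.filter (fun each => decide (∀ c ∈ each, pvNeg c ∉ each))
  -- r = [sorted(set(each), key=...) for each in r]
  let r := r.map (fun each => PySem.List.sorted (PySem.Set.ofList each) pvKey)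
  -- r = list(each for each, _ in groupby(sorted(r)))
  pvGroupbyKeys (PySem.List.sorted r (fun x => x) false)

-- ===== PORT B =====
def neg_alpha_alt (alpha : List (List String)) : List (List String) :=
  -- combos: clause-by-clause extension, pruning complementary literals as we go
  let combos := alpha.foldl
    (fun acc clause => acc.flatMap (fun combo => clause.filterMap (fun c =>
      let lit := pvNeg c
      if ∀ d ∈ combo, d ≠ pvNeg lit ∧ pvNeg d ≠ lit then some (combo ++ [lit]) else none)))
    [[]]
  let canon := combos.map (fun combo => PySem.List.sorted (PySem.Set.ofList combo) pvKey)
  -- sort, then keep each element differing from the last one kept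
  (PySem.List.sorted canon (fun x => x) false).foldl
    (fun out each => if out.getLast? = some each then out else out ++ [each]) []

-- ===== PRECONDITION & SPEC =====
def Spec_neg_alpha (alpha : List (List String)) (out : List (List String)) : Prop := out = neg_alpha_alt alpha
instance (alpha : List (List String)) (out : List (List String)) : Decidable (Spec_neg_alpha alpha out) := by unfold Spec_neg_alpha; infer_instance

-- ===== CLAIM (what is proved, stated in full; the proofs are below) =====
def Claim_equal_neg_alpha : Prop := ∀ (alpha : List (List String)), Dom_neg_alpha alpha → Spec_neg_alpha alpha (neg_alpha alpha)

-- ===== LEMMAS AND PROOFS =====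

-- proof-side names for the two fold steps and the tautology filter
def pvSA (acc : List (List String)) (cl : List String) : List (List String) :=
  acc.flatMap (fun t => cl.map (fun c => t ++ [pvNeg c]))
def pvSB (acc : List (List String)) (cl : List String) : List (List String) :=
  acc.flatMap (fun combo => cl.filterMap (fun c =>
    let lit := pvNeg c
    if ∀ d ∈ combo, d ≠ pvNeg lit ∧ pvNeg d ≠ lit then some (combo ++ [lit]) else none))
def pvP (each : List String) : Bool := decide (∀ c ∈ each, pvNeg c ∉ each)

lemma pvGo_no_dash : ∀ (fuel : Nat) (l acc : List Char), l.length ≤ fuel → '-' ∉ acc →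
    '-' ∉ PySem.Chars.replace.go ['-'] [] fuel l acc := by
  intro fuel
  induction fuel with
  | zero =>
    intro l acc hl hacc
    have hnil : l = [] := List.eq_nil_of_length_eq_zero (Nat.le_zero.mp hl)
    subst hnil
    rw [PySem.Chars.replace.go]
    simpa using hacc
  | succ n ih =>
    intro l acc hl hacc
    cases l with
    | nil =>
      rw [PySem.Chars.replace.go]
      · simpa using hacc
      · omega
    | cons c t =>
      rw [PySem.Chars.replace.go]
      by_cases hp : ['-'].isPrefixOf (c :: t) = true
      · simp only [hp, if_true]
        exact ih _ _ (by simpa using Nat.le_of_succ_le_succ hl) (by simpa using hacc)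
      · simp only [hp]
        have hc : c ≠ '-' := by
          intro h; apply hp; simp [List.isPrefixOf, h]
        exact ih _ _ (Nat.le_of_succ_le_succ hl) (by
          intro hm
          rcases List.mem_cons.mp hm with h | h
          · exact hc h.symm
          · exact hacc h)

lemma pvReplace_no_dash (cs : List Char) : '-' ∉ PySem.Chars.replace cs ['-'] [] := by
  rw [PySem.Chars.replace]
  simp only [List.isEmpty_cons]
  exact pvGo_no_dash cs.length cs [] le_rfl (by simp)

lemma pvNeg_ne (x : String) : pvNeg x ≠ x := by
  intro h
  unfold pvNeg at h
  split_ifs at h with hin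
  · -- '-' in x: the replacement contains no '-', but x does
    have hmem : '-' ∈ x.toList := by
      have h1 := (PySem.Str.isIn_iff_infix "-" x).mp hin
      have h2 : ("-" : String).toList = ['-'] := by decide
      rw [h2] at h1
      exact (List.singleton_infix_iff _ _).mp h1
    have h3 : (PySem.Str.replace x "-" "").toList = x.toList := congrArg String.toList h
    rw [PySem.Str.toList_replace] at h3
    have h4 : ("-" : String).toList = ['-'] := by decide
    have h5 : ("" : String).toList = [] := by decide
    rw [h4, h5] at h3
    rw [← h3] at hmem
    exact pvReplace_no_dash x.toList hmem
  · have h1 : ('-' :: x.toList) = x.toList := by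
      have := congrArg String.toList h
      simp at this
    exact absurd (congrArg List.length h1) (by simp)

lemma pvGood_snoc {t : List String} {lit : String} (h : ∀ c ∈ t, pvNeg c ∉ t) :
    (∀ c ∈ t ++ [lit], pvNeg c ∉ t ++ [lit]) ↔ (∀ d ∈ t, d ≠ pvNeg lit ∧ pvNeg d ≠ lit) := by
  constructor
  · intro hg d hd
    constructor
    · intro hde
      have := hg lit (List.mem_append_right _ (List.mem_singleton_self _))
      exact this (List.mem_append_left _ (hde ▸ hd))
    · intro hpe
      have := hg d (List.mem_append_left _ hd)
      exact this (List.mem_append_right _ (by simp [hpe]))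
  · intro hguard c hc hmem
    rcases List.mem_append.mp hc with hct | hcl
    · rcases List.mem_append.mp hmem with hmt | hml
      · exact h c hct hmt
      · exact (hguard c hct).2 (List.mem_singleton.mp hml)
    · have hceq : c = lit := List.mem_singleton.mp hcl
      subst hceq
      rcases List.mem_append.mp hmem with hmt | hml
      · exact (hguard _ hmt).1 rfl
      · exact pvNeg_ne c (List.mem_singleton.mp hml)

lemma pvBad_snoc {t : List String} (lit : String) (h : ¬ ∀ c ∈ t, pvNeg c ∉ t) :
    ¬ ∀ c ∈ t ++ [lit], pvNeg c ∉ t ++ [lit] := by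
  intro hgood
  exact h (fun c hc hm => hgood c (List.mem_append_left _ hc) (List.mem_append_left _ hm))

lemma pvMapFilter {t : List String} (cl : List String) (h : ∀ c ∈ t, pvNeg c ∉ t) :
    (cl.map (fun c => t ++ [pvNeg c])).filter pvP
      = cl.filterMap (fun c =>
          let lit := pvNeg c
          if ∀ d ∈ t, d ≠ pvNeg lit ∧ pvNeg d ≠ lit then some (t ++ [lit]) else none) := by
  induction cl with
  | nil => rfl
  | cons c cl ih =>
    simp only [List.map_cons, List.filter_cons, List.filterMap_cons]
    by_cases hg : ∀ d ∈ t, d ≠ pvNeg (pvNeg c) ∧ pvNeg d ≠ pvNeg c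
    · have hpt : pvP (t ++ [pvNeg c]) = true := decide_eq_true ((pvGood_snoc h).mpr hg)
      simp only [if_pos hg, ih, hpt, if_true]
    · have hpt : pvP (t ++ [pvNeg c]) = false :=
        decide_eq_false (fun hgg => hg ((pvGood_snoc h).mp hgg))
      simp [hpt, hg, ih]

lemma pvStepEq (acc : List (List String)) (cl : List String) (h : ∀ t ∈ acc, ∀ c ∈ t, pvNeg c ∉ t) :
    (pvSA acc cl).filter pvP = pvSB acc cl := by
  induction acc with
  | nil => rfl
  | cons t acc ih =>
    simp only [pvSA, pvSB, List.flatMap_cons, List.filter_append] at *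
    rw [pvMapFilter cl (h t (List.mem_cons_self))]
    rw [ih (fun t' ht' => h t' (List.mem_cons_of_mem _ ht'))]

lemma pvSA_filter (acc : List (List String)) (cl : List String) :
    (pvSA acc cl).filter pvP = (pvSA (acc.filter pvP) cl).filter pvP := by
  induction acc with
  | nil => rfl
  | cons t acc ih =>
    by_cases hp : pvP t = true
    · simp only [pvSA, List.flatMap_cons, List.filter_append, List.filter_cons, hp, if_true] at *
      rw [ih]
    · have hbad : ¬ ∀ c ∈ t, pvNeg c ∉ t := by simpa [pvP] using hp
      have hnil : (cl.map (fun c => t ++ [pvNeg c])).filter pvP = [] := by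
        apply List.filter_eq_nil_iff.mpr
        intro u hu
        rcases List.mem_map.mp hu with ⟨c, _, rfl⟩
        simpa [pvP] using pvBad_snoc (pvNeg c) hbad
      simp only [pvSA, List.flatMap_cons, List.filter_append, List.filter_cons, hp,
        Bool.false_eq_true, if_false, hnil, List.nil_append] at *
      rw [ih]

lemma pvFoldFilter (clss : List (List String)) : ∀ l : List (List String),
    (clss.foldl pvSA l).filter pvP = (clss.foldl pvSA (l.filter pvP)).filter pvP := by
  induction clss with
  | nil =>
    intro l
    simp [List.filter_filter]
  | cons cl clss ih =>
    intro l
    simp only [List.foldl_cons]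
    rw [ih (pvSA l cl), ih (pvSA (l.filter pvP) cl), pvSA_filter l cl]

lemma pvFoldEq (clss : List (List String)) : ∀ acc : List (List String),
    (∀ t ∈ acc, ∀ c ∈ t, pvNeg c ∉ t) →
    (clss.foldl pvSA acc).filter pvP = clss.foldl pvSB acc := by
  induction clss with
  | nil =>
    intro acc h
    exact List.filter_eq_self.mpr (fun t ht => decide_eq_true (h t ht))
  | cons cl clss ih =>
    intro acc h
    simp only [List.foldl_cons]
    rw [pvFoldFilter clss (pvSA acc cl),
      ih ((pvSA acc cl).filter pvP) (fun t ht => of_decide_eq_true (List.mem_filter.mp ht).2),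
      pvStepEq acc cl h]

-- adjacent-dedup: A's groupby-keys recursion equals B's left fold
def pvTail {α : Type} [DecidableEq α] (y : α) : List α → List α
  | [] => []
  | x :: xs => if x = y then pvTail y xs else x :: pvTail x xs

lemma pvTail_eq_group {α : Type} [DecidableEq α] :
    ∀ (l : List α) (y : α), pvTail y l = pvGroupbyKeys (l.dropWhile (fun z => decide (z = y))) := by
  intro l
  induction l with
  | nil =>
    intro y
    simp only [pvTail, List.dropWhile_nil]
    rw [pvGroupbyKeys]
  | cons x xs ih =>
    intro y
    by_cases hxy : x = y
    · simp only [pvTail, hxy, if_true, List.dropWhile_cons, decide_eq_true_eq]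
      exact ih y
    · simp only [pvTail, hxy, if_false, List.dropWhile_cons, decide_eq_true_eq]
      rw [pvGroupbyKeys, ih x]

lemma pvFold_snoc {α : Type} [DecidableEq α] :
    ∀ (l acc : List α) (y : α), acc.getLast? = some y →
    l.foldl (fun out each => if out.getLast? = some each then out else out ++ [each]) acc
      = acc ++ pvTail y l := by
  intro l
  induction l with
  | nil => intro acc y _; simp [pvTail]
  | cons x xs ih =>
    intro acc y h
    simp only [List.foldl_cons]
    by_cases hxy : x = y
    · have hlast : acc.getLast? = some x := by rw [h, hxy]
      simp only [hlast, if_true, pvTail, hxy]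
      exact ih acc y h
    · have hne : ¬ (acc.getLast? = some x) := by
        rw [h]; intro e; exact hxy (Option.some.inj e).symm
      simp only [hne, if_false, pvTail, if_neg hxy]
      rw [ih (acc ++ [x]) x List.getLast?_concat, List.append_assoc, List.singleton_append]

lemma pvDedup_eq {α : Type} [DecidableEq α] (l : List α) :
    l.foldl (fun out each => if out.getLast? = some each then out else out ++ [each]) []
      = pvGroupbyKeys l := by
  cases l with
  | nil =>
    simp only [List.foldl_nil]
    rw [pvGroupbyKeys]
  | cons x xs =>
    simp only [List.foldl_cons]
    rw [if_neg (by simp), List.nil_append]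
    rw [pvFold_snoc xs [x] x rfl, pvGroupbyKeys, pvTail_eq_group xs x, List.singleton_append]

-- ===== VERDICT (by name: the statement is the Claim_ definition above) =====
theorem neg_alpha_spec : Claim_equal_neg_alpha := by
  intro alpha _hdom
  show neg_alpha alpha = neg_alpha_alt alpha
  unfold neg_alpha neg_alpha_alt
  simp only [List.foldl_map, List.map_map, Function.comp_def]
  show pvGroupbyKeys (PySem.List.sorted
      (((alpha.foldl pvSA [[]]).filter pvP).map
        (fun each => PySem.List.sorted (PySem.Set.ofList each) pvKey)) (fun x => x) false)
    = (PySem.List.sorted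
      ((alpha.foldl pvSB [[]]).map
        (fun combo => PySem.List.sorted (PySem.Set.ofList combo) pvKey)) (fun x => x) false).foldl
      (fun out each => if out.getLast? = some each then out else out ++ [each]) []
  rw [pvFoldEq alpha [[]] (by intro t ht c hc; simp at ht; subst ht; simp at hc)]
  rw [pvDedup_eq]
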